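-- pv_equiv track=rewrite | github.com/offscale/django-settings-cli | django_settings_cli/pypy_utils.py | _format_explanation
-- ===== SOURCE A (Python) =====
-- def _format_explanation(explanation):
--     """This formats an explanation
--
--     Normally all embedded newlines are escaped, however there are
--     three exceptions: \n{, \n} and \n~.  The first two are intended
--     cover nested explanations, see function and attribute explanations
--     for examples (.visit_Call(), visit_Attribute()).  The last one is
--     for when one explanation needs to span multiple lines, e.g. when
--     displaying diffs.
--     """
--     raw_lines = (explanation or '').split('\n')
--     # escape newlines not followed by {, } and ~
--     lines = [raw_lines[0]]
--     for l in raw_lines[1:]: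
--         if l.startswith('{') or l.startswith('}') or l.startswith('~'):
--             lines.append(l)
--         else:
--             lines[-1] += '\\n' + l
--
--     result = lines[:1]
--     stack = [0]
--     stackcnt = [0]
--     for line in lines[1:]:
--         if line.startswith('{'):
--             if stackcnt[-1]:
--                 s = 'and   '
--             else:
--                 s = 'where '
--             stack.append(len(result))
--             stackcnt[-1] += 1
--             stackcnt.append(0)
--             result.append(' +' + '  ' * (len(stack) - 1) + s + line[1:])
--         elif line.startswith('}'):
--             assert line.startswith('}')
--             stack.pop()
--             stackcnt.pop()
--             result[stack[-1]] += line[1:]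
--         else:
--             assert line.startswith('~')
--             result.append('  ' * len(stack) + line[1:])
--     assert len(stack) == 1
--     return '\n'.join(result)
-- ===== SOURCE B (Python) =====
-- def _format_explanation(explanation):
--     """Recursive-descent re-implementation: same newline-merge pass, then a
--     DFS walk over an iterator of the remaining lines instead of an explicit
--     stack/stackcnt loop."""
--     raw_lines = (explanation or '').split('\n')
--     lines = [raw_lines[0]]
--     for l in raw_lines[1:]:
--         if l.startswith(('{', '}', '~')):
--             lines.append(l)
--         else:
--             lines[-1] += '\\n' + l
--
--     it = iter(lines[1:])
--     result = [lines[0]]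
--
--     def walk(depth, own_idx):
--         # Processes one block; returns the text after the close-brace line ending it
--         # (the caller glues it onto its own open line), or '' at end of input.
--         cnt = 0
--         for line in it:
--             rest = line[1:]
--             if line.startswith('{'):
--                 keyword = 'and   ' if cnt else 'where '
--                 cnt += 1
--                 result.append(' +' + '  ' * (depth + 1) + keyword + rest)
--                 result[own_idx] += walk(depth + 1, len(result) - 1)
--             elif line.startswith('}'):
--                 return rest
--             else:
--                 result.append('  ' * (depth + 1) + rest)
--         return ''
--
--     walk(0, 0)
--     return '\n'.join(result)
-- ===== Notes on version B (the rewrite author's own statement) =====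
-- stated objective: alternative
-- what changed: The explicit stack/stackcnt loop is replaced by a recursive-descent walk over the remaining lines: each block is formatted by a recursive helper that returns the text after its close-brace line for the caller to glue onto its own open line.
import Mathlib
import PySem

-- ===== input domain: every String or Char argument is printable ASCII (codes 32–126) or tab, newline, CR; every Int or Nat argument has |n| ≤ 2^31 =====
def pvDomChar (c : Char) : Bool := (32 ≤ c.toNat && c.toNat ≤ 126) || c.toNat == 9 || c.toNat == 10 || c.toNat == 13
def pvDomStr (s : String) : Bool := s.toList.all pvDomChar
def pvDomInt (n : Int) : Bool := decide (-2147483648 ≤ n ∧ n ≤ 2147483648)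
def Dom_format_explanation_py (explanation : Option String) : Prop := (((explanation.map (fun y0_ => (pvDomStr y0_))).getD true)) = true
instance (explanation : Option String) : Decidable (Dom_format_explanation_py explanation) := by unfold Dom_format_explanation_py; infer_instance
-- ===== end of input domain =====

-- B replaces A's explicit stack/stackcnt loop by a recursive-descent walk over the remaining
-- lines (objective: alternative decomposition, same cost); return values agree on Pre_.

-- '  ' * k
def pvIndent (k : Nat) : List Char := List.flatten (List.replicate k [' ', ' '])

-- l.startswith(('{', '}', '~'))
def pvKeep (l : List Char) : Bool :=
  PySem.Chars.startswith l ['{'] || PySem.Chars.startswith l ['}'] || PySem.Chars.startswith l ['~']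

-- lines[-1] += t  (exact for nonempty lists; the merge accumulator is never empty)
def pvAppendLast (xs : List (List Char)) (t : List Char) : List (List Char) :=
  xs.dropLast ++ [(xs.getLast?.getD []) ++ t]

-- result[i] += t  (exact: i is always in range on admitted inputs)
def pvAppendAt : List (List Char) → Nat → List Char → List (List Char)
  | [], _, _ => []
  | x :: xs, 0, t => (x ++ t) :: xs
  | x :: xs, n+1, t => x :: pvAppendAt xs n t

-- the newline-merge pass shared verbatim by A and B:
-- lines = [raw[0]]; for l in raw[1:]: append if it starts with {,},~ else lines[-1] += '\n'+l
def pvMerge (raw : List (List Char)) : List (List Char) :=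
  match raw with
  | [] => []          -- unreachable: str.split never returns an empty list
  | r0 :: rest =>
      rest.foldl (fun lines l =>
        if pvKeep l then lines ++ [l] else pvAppendLast lines ('\\' :: 'n' :: l)) [r0]

-- ===== PORT A =====
-- one iteration of A's loop over (result, stack, stackcnt); stack/stackcnt keep their top at the HEAD
def pvStepA (st : List (List Char) × List Nat × List Nat) (line : List Char) :
    List (List Char) × List Nat × List Nat :=
  let result := st.1
  let stack := st.2.1
  let stackcnt := st.2.2
  if PySem.Chars.startswith line ['{'] then
    let s := if stackcnt.headD 0 ≠ 0 then "and   ".toList else "where ".toList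
    let stack' := result.length :: stack
    let stackcnt' := 0 :: (stackcnt.headD 0 + 1) :: stackcnt.tail
    (result ++ [[' ', '+'] ++ pvIndent (stack'.length - 1) ++ s ++ line.tail], stack', stackcnt')
  else if PySem.Chars.startswith line ['}'] then
    let stack' := stack.tail
    let stackcnt' := stackcnt.tail
    (pvAppendAt result (stack'.headD 0) line.tail, stack', stackcnt')
  else
    (result ++ [pvIndent stack.length ++ line.tail], stack, stackcnt)

def format_explanation_py (explanation : Option String) : String :=
  let rawLines := PySem.Chars.splitOn ((explanation.getD "").toList) ['\n']
  let lines := pvMerge rawLines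
  let fin := (lines.drop 1).foldl pvStepA (lines.take 1, [0], [0])
  String.ofList (PySem.Chars.join ['\n'] fin.1)

-- ===== PORT B =====
-- walk(depth, own_idx): consumes lines from the iterator (= the explicit `rest` list) until the
-- close-brace line ending its block; returns (text after it, remaining lines, result so far).
-- fuel = number of remaining lines, a pure totality guard (never exhausted when fuel ≥ rest.length).
def pvWalkB (fuel : Nat) (rest : List (List Char)) (depth own cnt : Nat)
    (result : List (List Char)) : List Char × List (List Char) × List (List Char) :=
  match fuel with
  | 0 => ([], rest, result)
  | f + 1 =>
    match rest with
    | [] => ([], [], result)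
    | line :: rs =>
      if PySem.Chars.startswith line ['{'] then
        let keyword := if cnt ≠ 0 then "and   ".toList else "where ".toList
        let result1 := result ++ [[' ', '+'] ++ pvIndent (depth + 1) ++ keyword ++ line.tail]
        let r := pvWalkB f rs (depth + 1) (result1.length - 1) 0 result1
        pvWalkB f r.2.1 depth own (cnt + 1) (pvAppendAt r.2.2 own r.1)
      else if PySem.Chars.startswith line ['}'] then
        (line.tail, rs, result)
      else
        pvWalkB f rs depth own cnt (result ++ [pvIndent (depth + 1) ++ line.tail])

def format_explanation_py_alt (explanation : Option String) : String :=
  let rawLines := PySem.Chars.splitOn ((explanation.getD "").toList) ['\n']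
  let lines := pvMerge rawLines
  let body := lines.drop 1
  let r := pvWalkB body.length body 0 0 0 (lines.take 1)
  String.ofList (PySem.Chars.join ['\n'] r.2.2)

-- ===== PRECONDITION & SPEC =====
-- signature of a line for brace balance: +1 for '{…', -1 for '}…', 0 otherwise
def pvSig (l : List Char) : Int :=
  if PySem.Chars.startswith l ['{'] then 1
  else if PySem.Chars.startswith l ['}'] then -1 else 0

-- Pre_ excludes exactly the inputs whose open-/close-brace lines are unbalanced: there A raises
-- (IndexError popping an empty stack, or the final length assert).
def Pre_format_explanation_py (explanation : Option String) : Prop :=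
  let sigs := ((PySem.Chars.splitOn ((explanation.getD "").toList) ['\n']).drop 1).map pvSig
  (∀ n ∈ List.range (sigs.length + 1), 0 ≤ (sigs.take n).sum) ∧ sigs.sum = 0
instance (explanation : Option String) : Decidable (Pre_format_explanation_py explanation) := by
  unfold Pre_format_explanation_py; infer_instance

def pvWitness_format_explanation_py : Option String := some "a\n{b\n~c\n}d"

def Spec_format_explanation_py (explanation : Option String) (out : String) : Prop := out = format_explanation_py_alt explanation
instance (explanation : Option String) (out : String) : Decidable (Spec_format_explanation_py explanation out) := by unfold Spec_format_explanation_py; infer_instance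

-- ===== CLAIM (what is proved, stated in full; the proofs are below) =====
def Claim_equal_format_explanation_py : Prop := ∀ (explanation : Option String), Dom_format_explanation_py explanation → Pre_format_explanation_py explanation → Spec_format_explanation_py explanation (format_explanation_py explanation)

-- ===== LEMMAS AND PROOFS =====

-- balanced-brace grammar of the merged lines after the first one
inductive BalL : List (List Char) → Prop
  | nil : BalL []
  | tilde (l : List Char) (rest : List (List Char))
      (h1 : PySem.Chars.startswith l ['{'] = false)
      (h2 : PySem.Chars.startswith l ['}'] = false) :
      BalL rest → BalL (l :: rest)
  | block (o : List Char) (body : List (List Char)) (c : List Char) (rest : List (List Char))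
      (ho : PySem.Chars.startswith o ['{'] = true)
      (hc : PySem.Chars.startswith c ['}'] = true) :
      BalL body → BalL rest → BalL (o :: body ++ c :: rest)

-- running-sum balance with offset a
def BalFrom (a : Int) (xs : List Int) : Prop :=
  (∀ n : Nat, 0 ≤ a + (xs.take n).sum) ∧ a + xs.sum = 0

theorem startswith_cons (x : Char) (xs : List Char) (p : Char) :
    PySem.Chars.startswith (x :: xs) [p] = (x == p) := by
  simp [PySem.Chars.startswith, List.isPrefixOf, eq_comm]

theorem startswith_nil (p : Char) :
    PySem.Chars.startswith ([] : List Char) [p] = false := by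
  simp [PySem.Chars.startswith, List.isPrefixOf]

theorem pvSig_append_merge (s t : List Char) : pvSig (s ++ '\\' :: t) = pvSig s := by
  cases s with
  | nil => simp [pvSig, startswith_cons, startswith_nil]
  | cons x xs => simp [pvSig, startswith_cons]

theorem balFrom_cons (a : Int) (x : Int) (xs : List Int) :
    BalFrom a (x :: xs) ↔ 0 ≤ a ∧ BalFrom (a + x) xs := by
  unfold BalFrom
  constructor
  · rintro ⟨h1, h2⟩
    refine ⟨by simpa using h1 0, fun n => ?_, ?_⟩
    · have := h1 (n + 1); simp only [List.take_succ_cons, List.sum_cons] at this; omega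
    · simp only [List.sum_cons] at h2; omega
  · rintro ⟨ha, h1, h2⟩
    refine ⟨fun n => ?_, ?_⟩
    · cases n with
      | zero => simpa using ha
      | succ m =>
        have := h1 m; simp only [List.take_succ_cons, List.sum_cons]; omega
    · simp only [List.sum_cons]; omega

-- filtering out lines whose signature is 0 preserves balance
theorem balFrom_filter (ls : List (List Char)) :
    ∀ a : Int, BalFrom a (ls.map pvSig) → BalFrom a ((ls.filter pvKeep).map pvSig) := by
  induction ls with
  | nil => intro a h; exact h
  | cons l ls ih =>
    intro a h
    rw [List.map_cons, balFrom_cons] at h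
    by_cases hk : pvKeep l
    · rw [List.filter_cons_of_pos hk, List.map_cons, balFrom_cons]
      exact ⟨h.1, ih _ h.2⟩
    · have hz : pvSig l = 0 := by
        simp only [pvKeep, Bool.or_eq_true, not_or] at hk
        push Not at hk
        simp [pvSig, Bool.eq_false_iff.mpr hk.1.1, Bool.eq_false_iff.mpr hk.1.2]
      rw [List.filter_cons_of_neg (by simpa using hk)]
      have := h.2; rw [hz, add_zero] at this; exact ih _ this

-- signatures through the merge pass: appending junk to the last line never changes signatures,
-- so the merged tail carries exactly the kept lines' signatures
theorem pvMerge_sig (rest : List (List Char)) :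
    ∀ acc : List (List Char), acc ≠ [] →
      (rest.foldl (fun lines l =>
        if pvKeep l then lines ++ [l] else pvAppendLast lines ('\\' :: 'n' :: l)) acc).map pvSig
      = acc.map pvSig ++ ((rest.filter pvKeep).map pvSig) := by
  induction rest with
  | nil => intro acc _; simp
  | cons l rest ih =>
    intro acc hacc
    by_cases hk : pvKeep l
    · rw [List.foldl_cons, if_pos hk, List.filter_cons_of_pos hk, ih _ (by intro h; simp at h)]
      simp
    · rw [List.foldl_cons, if_neg hk, List.filter_cons_of_neg (by simpa using hk),
        ih _ (by intro h; simp [pvAppendLast] at h)]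
      congr 1
      obtain ⟨init, last, rfl⟩ : ∃ i la, acc = i ++ [la] :=
        ⟨acc.dropLast, acc.getLast hacc, (List.dropLast_append_getLast hacc).symm⟩
      simp [pvAppendLast, pvSig_append_merge]

theorem pvSig_bounds (l : List Char) : -1 ≤ pvSig l ∧ pvSig l ≤ 1 := by
  unfold pvSig; split_ifs <;> omega

-- balance of signatures yields the grammar
theorem balL_of_balFrom : ∀ (n : Nat) (ls : List (List Char)), ls.length ≤ n →
    BalFrom 0 (ls.map pvSig) → BalL ls := by
  intro n
  induction n with
  | zero =>
    intro ls hl _; rw [List.length_eq_zero_iff.mp (Nat.le_zero.mp hl)]; exact BalL.nil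
  | succ N ih =>
    intro ls hl hb
    match ls with
    | [] => exact BalL.nil
    | l :: ls' =>
      rw [List.map_cons, balFrom_cons, zero_add] at hb
      by_cases h1 : PySem.Chars.startswith l ['{']
      · -- sig l = 1: split off the matching close
        have hs : pvSig l = 1 := by simp [pvSig, h1]
        rw [hs] at hb
        have hb := hb.2
        set S : List Int := ls'.map pvSig with hS
        have hex : ∃ m : Nat, (S.take m).sum = -1 :=
          ⟨S.length, by have := hb.2; simp at this ⊢; omega⟩
        set m0 := Nat.find hex with hm0
        have hm0spec : (S.take m0).sum = -1 := Nat.find_spec hex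
        have hm0min : ∀ k < m0, (S.take k).sum ≠ -1 := fun k hk => Nat.find_min hex hk
        have hm0pos : 0 < m0 := by
          rcases Nat.eq_zero_or_pos m0 with h | h
          · exfalso; rw [h] at hm0spec; simp at hm0spec
          · exact h
        obtain ⟨j, hj⟩ : ∃ j, m0 = j + 1 := ⟨m0 - 1, by omega⟩
        rw [hj] at hm0spec hm0min
        have hjlen : j < ls'.length := by
          by_contra hge
          push Not at hge
          have hlen : S.length ≤ j := by simpa [hS] using hge
          rw [List.take_of_length_le (by omega)] at hm0spec
          have hmin := hm0min S.length (by omega)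
          rw [List.take_length] at hmin
          exact hmin hm0spec
        have hjS : j < S.length := by simpa [hS] using hjlen
        have hcnonneg : ∀ k, k ≤ j → 0 ≤ (S.take k).sum := by
          intro k hk
          have hge : -1 ≤ (S.take k).sum := by
            have := hb.1 k; omega
          have hne := hm0min k (by omega)
          omega
        have hsum_succ : (S.take (j+1)).sum = (S.take j).sum + S[j] := List.sum_take_succ S j hjS
        have hSj : S[j] = pvSig ls'[j] := by simp [hS]
        have hbnd := pvSig_bounds ls'[j]
        have hcj : (S.take j).sum = 0 := by
          have := hcnonneg j (le_refl j); rw [hsum_succ, hSj] at hm0spec; omega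
        have hsigc : pvSig ls'[j] = -1 := by rw [hsum_succ, hSj] at hm0spec; omega
        have hcstart : PySem.Chars.startswith ls'[j] ['}'] = true := by
          by_contra hcn
          simp only [Bool.not_eq_true] at hcn
          unfold pvSig at hsigc
          rw [hcn] at hsigc
          split_ifs at hsigc <;> omega
        -- decompose ls' = take j ++ ls'[j] :: drop (j+1)
        have hdec : ls' = ls'.take j ++ ls'[j] :: ls'.drop (j+1) := by
          conv_lhs => rw [← List.take_append_drop j ls']
          rw [List.drop_eq_getElem_cons hjlen]
        have hbody : BalL (ls'.take j) := by
          apply ih _ (by have := hl; simp at this ⊢; omega)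
          constructor
          · intro k
            rw [zero_add]
            have : ((ls'.take j).map pvSig).take k = S.take (min k j) := by
              simp [hS, List.map_take, List.take_take]
            rw [this]
            exact hcnonneg _ (by omega)
          · have : (ls'.take j).map pvSig = S.take j := by simp [hS, List.map_take]
            rw [zero_add, this, hcj]
        have hrest : BalL (ls'.drop (j+1)) := by
          apply ih _ (by have := hl; simp at this ⊢; omega)
          have hdropmap : (ls'.drop (j+1)).map pvSig = S.drop (j+1) := by
            simp [hS, List.map_drop]
          constructor
          · intro k
            rw [zero_add, hdropmap]
            have hsplit : (S.take (j+1+k)).sum = (S.take (j+1)).sum + ((S.drop (j+1)).take k).sum := by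
              rw [List.take_add, List.sum_append]
            have h1' := hb.1 (j+1+k)
            omega
          · rw [zero_add, hdropmap]
            have hsplit : S.sum = (S.take (j+1)).sum + (S.drop (j+1)).sum := by
              conv_lhs => rw [← List.take_append_drop (j+1) S]
              rw [List.sum_append]
            have := hb.2
            omega
        have hblk := BalL.block l (ls'.take j) ls'[j] (ls'.drop (j+1)) h1 hcstart hbody hrest
        have heq : (l :: ls'.take j) ++ ls'[j] :: ls'.drop (j+1) = l :: ls' := by
          rw [List.cons_append, ← hdec]
        rwa [heq] at hblk
      · by_cases h2 : PySem.Chars.startswith l ['}']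
        · exfalso
          have hs : pvSig l = -1 := by simp [pvSig, h1, h2]
          rw [hs] at hb
          have h0 := hb.2.1 0
          simp at h0
        · have hs : pvSig l = 0 := by simp [pvSig, h1, h2]
          rw [hs] at hb
          exact BalL.tilde l ls' (Bool.eq_false_iff.mpr h1) (Bool.eq_false_iff.mpr h2)
            (ih ls' (by simpa using Nat.lt_succ_iff.mp (by simpa using hl)) hb.2)

-- startswith is decided by the first character alone
theorem startswith_close_not_open (l : List Char)
    (h : PySem.Chars.startswith l ['}'] = true) :
    PySem.Chars.startswith l ['{'] = false := by
  cases l with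
  | nil => rw [startswith_nil]
  | cons x xs =>
    rw [startswith_cons] at h ⊢
    simp at h; simp [h]

-- the unprocessed lines returned by the walk form a suffix, hence are no longer than the input
theorem pvWalkB_rest_length : ∀ (f : Nat) (rest : List (List Char)) (d o c : Nat)
    (res : List (List Char)), (pvWalkB f rest d o c res).2.1.length ≤ rest.length := by
  intro f
  induction f with
  | zero => intro rest d o c res; simp [pvWalkB]
  | succ f ih =>
    intro rest d o c res
    match rest with
    | [] => simp [pvWalkB]
    | line :: rs =>
      simp only [pvWalkB]
      by_cases h1 : PySem.Chars.startswith line ['{']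
      · simp only [h1, if_true]
        calc (pvWalkB f (pvWalkB f rs (d+1) _ 0 _).2.1 d o (c+1) _).2.1.length
            ≤ (pvWalkB f rs (d+1) _ 0 _).2.1.length := ih _ _ _ _ _
          _ ≤ rs.length := ih _ _ _ _ _
          _ ≤ (line :: rs).length := by simp
      · by_cases h2 : PySem.Chars.startswith line ['}']
        · simp [h1, h2]
        · simp only [h1, h2, if_false]
          calc (pvWalkB f rs d o c _).2.1.length ≤ rs.length := ih _ _ _ _ _
            _ ≤ (line :: rs).length := by simp

-- the walk's value does not depend on the fuel once the fuel covers the remaining lines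
theorem pvWalkB_fuel : ∀ (f g : Nat) (rest : List (List Char)) (d o c : Nat)
    (res : List (List Char)), rest.length ≤ f → rest.length ≤ g →
    pvWalkB f rest d o c res = pvWalkB g rest d o c res := by
  intro f
  induction f with
  | zero =>
    intro g rest d o c res hf _
    rw [List.length_eq_zero_iff.mp (Nat.le_zero.mp hf)]
    cases g <;> simp [pvWalkB]
  | succ f ih =>
    intro g rest d o c res hf hg
    match rest with
    | [] => cases g <;> simp [pvWalkB]
    | line :: rs =>
      match g with
      | 0 => exact absurd hg (by simp)
      | g + 1 =>
        simp only [pvWalkB]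
        simp only [List.length_cons] at hf hg
        by_cases h1 : PySem.Chars.startswith line ['{']
        · simp only [h1, if_true]
          rw [ih g rs _ _ _ _ (by omega) (by omega)]
          exact ih g _ _ _ _ _
            (le_trans (pvWalkB_rest_length _ _ _ _ _ _) (by omega))
            (le_trans (pvWalkB_rest_length _ _ _ _ _ _) (by omega))
        · by_cases h2 : PySem.Chars.startswith line ['}']
          · simp [h1, h2]
          · simp only [h1, h2, if_false]
            exact ih g _ _ _ _ _ (by omega) (by omega)

-- THE CORE LEMMA: running A's loop over a balanced block B from stack (own::is) restores the
-- stack and produces exactly the result list that B's walk produces before it goes on with K.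
theorem core : ∀ (B : List (List Char)), BalL B →
    ∀ (is cs : List Nat) (own cnt : Nat) (res : List (List Char)) (K : List (List Char)) (f g : Nat),
      B.length + K.length ≤ f → K.length ≤ g →
      ∃ res' cnt',
        List.foldl pvStepA (res, own :: is, cnt :: cs) B = (res', own :: is, cnt' :: cs) ∧
        pvWalkB f (B ++ K) is.length own cnt res = pvWalkB g K is.length own cnt' res' := by
  intro B hB
  induction hB with
  | nil =>
    intro is cs own cnt res K f g hf hg
    refine ⟨res, cnt, by simp, ?_⟩
    rw [List.nil_append]
    exact pvWalkB_fuel f g K _ _ _ _ (by simpa using hf) hg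
  | tilde l rest h1 h2 hrest ihr =>
    intro is cs own cnt res K f g hf hg
    simp only [List.length_cons] at hf
    match f with
    | 0 => omega
    | f + 1 =>
      obtain ⟨res', cnt', hA, hB⟩ :=
        ihr is cs own cnt (res ++ [pvIndent (is.length + 1) ++ l.tail]) K f g (by omega) hg
      refine ⟨res', cnt', ?_, ?_⟩
      · rw [List.foldl_cons]
        have hstep : pvStepA (res, own :: is, cnt :: cs) l
            = (res ++ [pvIndent (is.length + 1) ++ l.tail], own :: is, cnt :: cs) := by
          simp [pvStepA, h1, h2]
        rw [hstep, hA]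
      · rw [List.cons_append]
        simp only [pvWalkB, h1, h2, if_false]
        exact hB
  | block o body c rest ho hc hbody hrest ihb ihr =>
    intro is cs own cnt res K f g hf hg
    simp only [List.length_append, List.length_cons] at hf
    match f with
    | 0 => omega
    | f + 1 =>
      have hco := startswith_close_not_open c hc
      -- the open line both programs append, and the state A reaches after `o`
      set openLine : List Char :=
        [' ', '+'] ++ pvIndent (is.length + 1)
          ++ (if cnt ≠ 0 then "and   ".toList else "where ".toList) ++ o.tail with hopen
      have hstepO : pvStepA (res, own :: is, cnt :: cs) o
          = (res ++ [openLine], res.length :: own :: is, 0 :: (cnt + 1) :: cs) := by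
        simp [pvStepA, ho, hopen]
      -- A and B across the body (stack one deeper)
      obtain ⟨resb, cntb, hA1, hB1⟩ :=
        ihb (own :: is) ((cnt + 1) :: cs) res.length 0 (res ++ [openLine])
          (c :: (rest ++ K)) f f (by simp; omega) (by simp; omega)
      -- A and B across the close line
      have hstepC : pvStepA (resb, res.length :: own :: is, cntb :: (cnt + 1) :: cs) c
          = (pvAppendAt resb own c.tail, own :: is, (cnt + 1) :: cs) := by
        simp [pvStepA, hco, hc]
      -- A and B across the remainder of the enclosing block
      obtain ⟨res', cnt', hA2, hB2⟩ :=
        ihr is cs own (cnt + 1) (pvAppendAt resb own c.tail) K f g (by omega) hg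
      refine ⟨res', cnt', ?_, ?_⟩
      · rw [List.cons_append, List.foldl_cons, hstepO, List.foldl_append, hA1,
          List.foldl_cons, hstepC, hA2]
      · have hshape : ((o :: body) ++ c :: rest) ++ K = o :: (body ++ (c :: (rest ++ K))) := by
          simp
        rw [hshape]
        simp only [pvWalkB, ho, if_true]
        have hlen1 : (res ++ [openLine]).length - 1 = res.length := by simp
        have hdep : (own :: is).length = is.length + 1 := by simp
        rw [hlen1] at *
        have hB1' : pvWalkB f (body ++ (c :: (rest ++ K))) (is.length + 1) res.length 0
            (res ++ [openLine]) = (c.tail, rest ++ K, resb) := by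
          rw [← hdep, hB1, hdep]
          match f, (by omega : 1 ≤ f) with
          | f + 1, _ => simp [pvWalkB, hco, hc]
        rw [hB1', hB2]

-- ===== VERDICT (by name: the statement is the Claim_ definition above) =====
theorem format_explanation_py_spec : Claim_equal_format_explanation_py := by
  intro e _ hpre
  simp only [Pre_format_explanation_py] at hpre
  simp only [Spec_format_explanation_py, format_explanation_py, format_explanation_py_alt]
  cases hrawe : PySem.Chars.splitOn ((e.getD "").toList) ['\n'] with
  | nil => simp [hrawe, pvMerge, pvWalkB]
  | cons r0 rest =>
    simp only [hrawe] at hpre ⊢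
    simp only [List.drop_one, List.tail_cons] at hpre
    set lines := pvMerge (r0 :: rest) with hlines
    have hsig : (lines.drop 1).map pvSig = (rest.filter pvKeep).map pvSig := by
      have hm := pvMerge_sig rest [r0] (by intro h; simp at h)
      have hmap : lines.map pvSig = pvSig r0 :: (rest.filter pvKeep).map pvSig := by
        rw [hlines]; simpa [pvMerge] using hm
      calc (lines.drop 1).map pvSig = (lines.map pvSig).drop 1 := by rw [List.map_drop]
        _ = _ := by rw [hmap]; rfl
    have hbal : BalFrom 0 ((lines.drop 1).map pvSig) := by
      rw [hsig]
      apply balFrom_filter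
      constructor
      · intro n
        by_cases hn : n ≤ (rest.map pvSig).length
        · have := hpre.1 n (List.mem_range.mpr (by omega))
          simpa using this
        · rw [List.take_of_length_le (by omega)]
          have := hpre.2; omega
      · have := hpre.2; omega
    have hBalL := balL_of_balFrom (lines.drop 1).length (lines.drop 1) (le_refl _) hbal
    obtain ⟨res', cnt', hA, hB⟩ := core (lines.drop 1) hBalL [] [] 0 0 (lines.take 1) []
      (lines.drop 1).length 0 (by simp) (by simp)
    rw [List.append_nil] at hB
    simp only [List.length_nil] at hB
    simp only [pvWalkB] at hB
    rw [hA, hB]
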